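-- pv_equiv track=rewrite | github.com/lanyunshi/Multi-hopComplexKBQA | code/tool.py | generate_overlap_idx
-- ===== SOURCE A (Python) =====
-- def generate_longest_string(X, Y):
--     m, n = len(X), len(Y)
--     L = [[None]*(n + 1) for i in range(m + 1)]
--
--     for i in range(m + 1):
--         for j in range(n + 1):
--             if i == 0 or j == 0 :
--                 L[i][j] = 0
--             elif X[i-1] == Y[j-1]:
--                 L[i][j] = L[i-1][j-1]+1
--             else:
--                 L[i][j] = max(L[i-1][j], L[i][j-1])
--
--     return L[m][n]
--
-- def generate_overlap_idx(q, mid):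
--     mid = mid.split()
--     q = q.split()
--     longest_string, longest_string_boundary = 0, (0, 0)
--     for i in range(len(q) - len(mid) + 1):
--         longest_string_len = generate_longest_string(' '.join(mid), ' '.join(q[i: i + len(mid)]))
--         if longest_string_len > longest_string:
--             longest_string_boundary = (i, i + len(mid))
--             longest_string = longest_string_len
--     return longest_string_boundary
-- ===== SOURCE B (Python) =====
-- def _lcs_len(X, Y):
--     # LCS length computed by anti-diagonal wavefront: diagonal d holds cells (i, j)
--     # with i + j == d; each diagonal needs only the previous two.
--     m, n = len(X), len(Y)
--     prev2 = {}
--     prev1 = {0: 0}          # diagonal 0: just the cell (0, 0)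
--     for d in range(1, m + n + 1):
--         cur = {}
--         for j in range(max(0, d - m), min(d, n) + 1):
--             i = d - j
--             if i == 0 or j == 0:
--                 cur[j] = 0
--             elif X[i - 1] == Y[j - 1]:
--                 cur[j] = prev2[j - 1] + 1            # cell (i-1, j-1)
--             else:
--                 cur[j] = max(prev1[j], prev1[j - 1])  # cells (i-1, j) and (i, j-1)
--         prev2, prev1 = prev1, cur
--     return prev1[n]
--
--
-- def generate_overlap_idx(q, mid):
--     mid_words = mid.split()
--     q_words = q.split()
--     w = len(mid_words)
--     target = ' '.join(mid_words)
--     scores = [_lcs_len(target, ' '.join(q_words[i:i + w]))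
--               for i in range(len(q_words) - w + 1)]
--     best = max(scores, default=0)
--     if best <= 0:
--         return (0, 0)
--     i = scores.index(best)
--     return (i, i + w)
-- ===== Notes on version B (the rewrite author's own statement) =====
-- stated objective: alternative
-- what changed: The LCS helper is recomputed by an anti-diagonal wavefront that keeps only the last two diagonals (dicts keyed by column) instead of filling a full (m+1)x(n+1) table, and the window scan builds the list of window scores and picks the first argmax (via max/index) instead of threading a running strict maximum through the loop.
import Mathlib
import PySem

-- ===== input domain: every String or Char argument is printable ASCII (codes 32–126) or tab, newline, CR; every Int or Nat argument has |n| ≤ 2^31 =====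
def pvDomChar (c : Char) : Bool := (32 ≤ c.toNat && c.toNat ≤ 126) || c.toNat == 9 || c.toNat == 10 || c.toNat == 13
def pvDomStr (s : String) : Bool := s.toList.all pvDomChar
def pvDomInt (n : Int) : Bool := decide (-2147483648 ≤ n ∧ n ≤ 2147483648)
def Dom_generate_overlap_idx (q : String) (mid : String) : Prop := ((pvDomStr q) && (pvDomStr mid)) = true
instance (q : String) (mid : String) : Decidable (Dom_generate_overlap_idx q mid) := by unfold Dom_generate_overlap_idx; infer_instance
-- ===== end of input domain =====

-- B replaces A's full (m+1)×(n+1) LCS table by an anti-diagonal wavefront keeping only the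
-- last two diagonals, and replaces A's running-maximum window loop by a score list with a
-- first-argmax lookup; same return value everywhere (objective: alternative).

-- ===== PORT A =====
-- cell value Python computes for L[i][j] (None placeholders are ported as 0:
-- every cell Python reads has already been written, so the default is never read)
def glsCell (Xc Yc : List Char) (L : List (List Int)) (i j : Nat) : Int :=
  if i = 0 ∨ j = 0 then 0
  else if Xc.getD (i-1) ' ' = Yc.getD (j-1) ' ' then
    (L.getD (i-1) []).getD (j-1) 0 + 1
  else
    max ((L.getD (i-1) []).getD j 0) ((L.getD i []).getD (j-1) 0)

-- 'L[i][j] = v' (indices are the loop's range values, hence in range: List.set is exact)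
def glsSet (L : List (List Int)) (i j : Nat) (v : Int) : List (List Int) :=
  L.set i ((L.getD i []).set j v)

def generate_longest_string (X Y : String) : Int :=
  let Xc := X.toList
  let Yc := Y.toList
  let m := Xc.length
  let n := Yc.length
  let L0 : List (List Int) := List.replicate (m+1) (List.replicate (n+1) (0:Int))
  -- for i in range(m+1): for j in range(n+1): L[i][j] = …  (range over the Nats 0..m / 0..n)
  let L := (List.range (m+1)).foldl
    (fun L i => (List.range (n+1)).foldl (fun L j => glsSet L i j (glsCell Xc Yc L i j)) L) L0
  (L.getD m []).getD n 0

def generate_overlap_idx (q : String) (mid : String) : Int × Int :=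
  let midw := PySem.Str.split₀ mid
  let qw := PySem.Str.split₀ q
  let st := (PySem.List.pyRange 0 ((qw.length : Int) - (midw.length : Int) + 1)).foldl
    (fun (st : Int × (Int × Int)) i =>
      let len := generate_longest_string (PySem.Str.join " " midw)
        (PySem.Str.join " " (PySem.List.slice qw (some i) (some (i + (midw.length : Int)))))
      if len > st.1 then (len, (i, i + (midw.length : Int))) else st)
    ((0:Int), ((0:Int), (0:Int)))
  st.2

-- ===== PORT B =====
-- cell (i, j) of diagonal d (= i + j): prev1 is diagonal d-1, prev2 is diagonal d-2, keyed by j.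
-- X[i-1] with i ≥ 1 is ported as getD (i-1).toNat (nonnegative index, in range: exact);
-- the dict reads are ported as getD 0 — the keys are always present (KeyError never occurs).
def lcsDiagCell (Xc Yc : List Char) (prev2 prev1 : PySem.Dict Int Int) (d j : Int) : Int :=
  let i := d - j
  if i = 0 ∨ j = 0 then 0
  else if Xc.getD (i-1).toNat ' ' = Yc.getD (j-1).toNat ' ' then
    prev2.getD (j-1) 0 + 1
  else
    max (prev1.getD j 0) (prev1.getD (j-1) 0)

def lcs_len (X Y : String) : Int :=
  let Xc := X.toList
  let Yc := Y.toList
  let m : Int := Xc.length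
  let n : Int := Yc.length
  let st := (PySem.List.pyRange 1 (m + n + 1)).foldl
    (fun (st : PySem.Dict Int Int × PySem.Dict Int Int) d =>
      let cur := (PySem.List.pyRange (max 0 (d - m)) (min d n + 1)).foldl
        (fun cur j => cur.insert j (lcsDiagCell Xc Yc st.1 st.2 d j)) PySem.Dict.empty
      (st.2, cur))
    (PySem.Dict.empty, PySem.Dict.empty.insert 0 0)
  st.2.getD n 0

def generate_overlap_idx_alt (q : String) (mid : String) : Int × Int :=
  let midw := PySem.Str.split₀ mid
  let qw := PySem.Str.split₀ q
  let w : Int := midw.length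
  let target := PySem.Str.join " " midw
  let scores := (PySem.List.pyRange 0 ((qw.length : Int) - w + 1)).map
    (fun i => lcs_len target (PySem.Str.join " " (PySem.List.slice qw (some i) (some (i + w)))))
  let best := (PySem.List.max? scores (fun x => x)).getD 0   -- max(scores, default=0)
  if best ≤ 0 then (0, 0)
  else
    -- scores.index(best): best is a member here, so index? is some and the default is never used
    let k : Nat := (PySem.List.index? scores best).getD 0
    ((k : Int), (k : Int) + w)

-- ===== PRECONDITION & SPEC =====
def Spec_generate_overlap_idx (q : String) (mid : String) (out : Int × Int) : Prop := out = generate_overlap_idx_alt q mid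
instance (q : String) (mid : String) (out : Int × Int) : Decidable (Spec_generate_overlap_idx q mid out) := by unfold Spec_generate_overlap_idx; infer_instance

-- ===== CLAIM (what is proved, stated in full; the proofs are below) =====
def Claim_equal_generate_overlap_idx : Prop := ∀ (q : String) (mid : String), Dom_generate_overlap_idx q mid → Spec_generate_overlap_idx q mid (generate_overlap_idx q mid)

-- ===== LEMMAS AND PROOFS =====

def lcsI (X Y : List Char) : Nat → Nat → Nat
  | 0, _ => 0
  | _+1, 0 => 0
  | i+1, j+1 =>
    if X.getD i ' ' = Y.getD j ' ' then lcsI X Y i j + 1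
    else max (lcsI X Y i (j+1)) (lcsI X Y (i+1) j)
termination_by i j => (i, j)

@[simp] lemma lcsI_zero_left (X Y : List Char) (j : Nat) : lcsI X Y 0 j = 0 := by cases j <;> simp [lcsI]
@[simp] lemma lcsI_zero_right (X Y : List Char) (i : Nat) : lcsI X Y i 0 = 0 := by cases i <;> simp [lcsI]

lemma lcsI_succ (X Y : List Char) (i j : Nat) :
    lcsI X Y (i+1) (j+1) = if X.getD i ' ' = Y.getD j ' ' then lcsI X Y i j + 1
      else max (lcsI X Y i (j+1)) (lcsI X Y (i+1) j) := by
  simp [lcsI]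


def TShape (m n : Nat) (L : List (List Int)) : Prop := L.length = m + 1 ∧ ∀ r ∈ L, r.length = n + 1
def TVal (L : List (List Int)) (a b : Nat) : Int := (L.getD a []).getD b 0
def RowDone (Xc Yc : List Char) (n i : Nat) (L : List (List Int)) : Prop :=
  ∀ a b : Nat, a < i → b ≤ n → TVal L a b = (lcsI Xc Yc a b : Int)

lemma tval_glsSet {m n : Nat} {L : List (List Int)} (hS : TShape m n L)
    {i j : Nat} (hi : i ≤ m) (hj : j ≤ n) (v : Int) (a b : Nat) :
    TVal (glsSet L i j v) a b = if a = i ∧ b = j then v else TVal L a b := by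
  obtain ⟨hL, hR⟩ := hS
  have hiL : i < L.length := by omega
  have hrowe : L.getD i [] = L[i] := by
    simp [List.getD_eq_getElem?_getD, List.getElem?_eq_getElem hiL]
  have hrow : (L.getD i []) ∈ L := by rw [hrowe]; exact List.getElem_mem hiL
  have hjr : j < (L.getD i []).length := by rw [hR _ hrow]; omega
  unfold TVal glsSet
  by_cases hai : a = i
  · subst hai
    rw [show (L.set a ((L.getD a []).set j v)).getD a [] = (L.getD a []).set j v by
      simp [List.getD_eq_getElem?_getD, List.getElem?_set_self hiL]]
    by_cases hbj : b = j
    · subst hbj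
      simp only [and_self, if_true]
      rw [List.getD_eq_getElem?_getD, List.getElem?_set_self hjr]
      rfl
    · simp only [hbj, and_false, if_false]
      simp [List.getD_eq_getElem?_getD, List.getElem?_set_ne (Ne.symm hbj)]
  · simp only [hai, false_and, if_false]
    rw [show (L.set i ((L.getD i []).set j v)).getD a [] = L.getD a [] by
      simp [List.getD_eq_getElem?_getD, List.getElem?_set_ne (Ne.symm hai)]]

lemma glsSet_shape {m n : Nat} {L : List (List Int)} (hS : TShape m n L)
    {i : Nat} (hi : i ≤ m) (j : Nat) (v : Int) : TShape m n (glsSet L i j v) := by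
  obtain ⟨hL, hR⟩ := hS
  have hiL : i < L.length := by omega
  have hrow : (L.getD i []) ∈ L := by
    rw [show L.getD i [] = L[i] by simp [List.getD_eq_getElem?_getD, List.getElem?_eq_getElem hiL]]
    exact List.getElem_mem hiL
  refine ⟨by simp [glsSet, hL], ?_⟩
  intro r hr
  rcases List.mem_or_eq_of_mem_set hr with h | h
  · exact hR _ h
  · subst h; rw [List.length_set]; exact hR _ hrow

lemma glsCell_correct {Xc Yc : List Char} {m n : Nat} (hm : m = Xc.length) (hn : n = Yc.length)
    {L : List (List Int)} {i j : Nat} (hi : i ≤ m) (hj : j ≤ n)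
    (hRow : RowDone Xc Yc n i L)
    (hCol : ∀ b : Nat, b < j → TVal L i b = (lcsI Xc Yc i b : Int)) :
    glsCell Xc Yc L i j = (lcsI Xc Yc i j : Int) := by
  unfold glsCell
  rcases i with _ | i'
  · simp
  rcases j with _ | j'
  · simp
  have h1 : TVal L i' j' = (lcsI Xc Yc i' j' : Int) := hRow i' j' (by omega) (by omega)
  have h2 : TVal L i' (j'+1) = (lcsI Xc Yc i' (j'+1) : Int) := hRow i' (j'+1) (by omega) (by omega)
  have h3 : TVal L (i'+1) j' = (lcsI Xc Yc (i'+1) j' : Int) := hCol j' (by omega)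
  simp only [Nat.add_sub_cancel, Nat.succ_ne_zero, or_self, if_false]
  unfold TVal at h1 h2 h3
  rw [lcsI_succ]
  split_ifs with h
  · rw [h1]; push_cast; ring
  · rw [h2, h3]; push_cast; try ring

lemma inner_inv (Xc Yc : List Char) {m n : Nat} (hm : m = Xc.length) (hn : n = Yc.length)
    {i : Nat} (hi : i ≤ m) {L : List (List Int)} (hS : TShape m n L) (hRow : RowDone Xc Yc n i L) :
    ∀ j : Nat, j ≤ n + 1 →
      TShape m n ((List.range j).foldl (fun L j => glsSet L i j (glsCell Xc Yc L i j)) L) ∧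
      RowDone Xc Yc n i ((List.range j).foldl (fun L j => glsSet L i j (glsCell Xc Yc L i j)) L) ∧
      (∀ b : Nat, b < j →
        TVal ((List.range j).foldl (fun L j => glsSet L i j (glsCell Xc Yc L i j)) L) i b
          = (lcsI Xc Yc i b : Int)) := by
  intro j
  induction j with
  | zero => intro _; simpa using ⟨hS, hRow⟩
  | succ j ih =>
    intro hj1
    obtain ⟨ihS, ihRow, ihCol⟩ := ih (by omega)
    set Lj := (List.range j).foldl (fun L j => glsSet L i j (glsCell Xc Yc L i j)) L with hLj
    rw [show List.range (j+1) = List.range j ++ [j] from List.range_succ, List.foldl_append]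
    simp only [List.foldl_cons, List.foldl_nil]
    have hj : j ≤ n := by omega
    have hcell : glsCell Xc Yc Lj i j = (lcsI Xc Yc i j : Int) :=
      glsCell_correct hm hn hi hj ihRow ihCol
    refine ⟨glsSet_shape ihS hi _ _, ?_, ?_⟩
    · intro a b ha hb
      rw [tval_glsSet ihS hi hj _ a b, if_neg (by omega), ihRow a b ha hb]
    · intro b hb
      rw [tval_glsSet ihS hi hj _ i b]
      by_cases hbj : b = j
      · subst hbj; rw [if_pos ⟨rfl, rfl⟩, hcell]
      · rw [if_neg (by tauto), ihCol b (by omega)]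

lemma outer_inv (Xc Yc : List Char) {m n : Nat} (hm : m = Xc.length) (hn : n = Yc.length) :
    ∀ i : Nat, i ≤ m + 1 →
      TShape m n ((List.range i).foldl
        (fun L i => (List.range (n+1)).foldl (fun L j => glsSet L i j (glsCell Xc Yc L i j)) L)
        (List.replicate (m+1) (List.replicate (n+1) (0:Int)))) ∧
      RowDone Xc Yc n i ((List.range i).foldl
        (fun L i => (List.range (n+1)).foldl (fun L j => glsSet L i j (glsCell Xc Yc L i j)) L)
        (List.replicate (m+1) (List.replicate (n+1) (0:Int)))) := by
  intro i
  induction i with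
  | zero =>
    intro _
    constructor
    · exact ⟨by simp, fun r hr => by rw [List.eq_of_mem_replicate hr]; simp⟩
    · intro a b ha _; omega
  | succ i ih =>
    intro hi1
    obtain ⟨ihS, ihRow⟩ := ih (by omega)
    rw [show List.range (i+1) = List.range i ++ [i] from List.range_succ, List.foldl_append]
    simp only [List.foldl_cons, List.foldl_nil]
    have hi : i ≤ m := by omega
    obtain ⟨hS', hRow', hCol'⟩ := inner_inv Xc Yc hm hn hi ihS ihRow (n+1) (by omega)
    refine ⟨hS', ?_⟩
    intro a b ha hb
    by_cases hai : a = i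
    · subst hai; exact hCol' b (by omega)
    · exact hRow' a b (by omega) hb

lemma gls_eq_lcsI (X Y : String) :
    generate_longest_string X Y
      = (lcsI X.toList Y.toList X.toList.length Y.toList.length : Int) := by
  unfold generate_longest_string
  obtain ⟨hS, hRow⟩ := outer_inv X.toList Y.toList rfl rfl (X.toList.length + 1) (by omega)
  exact hRow X.toList.length Y.toList.length (by omega) (by omega)

lemma getD_foldl_insert (f : Int → Int) (js : List Int) (c0 : PySem.Dict Int Int) (x d : Int) :
    (js.foldl (fun c j => c.insert j (f j)) c0).getD x d
      = if x ∈ js then f x else c0.getD x d := by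
  induction js generalizing c0 with
  | nil => simp
  | cons j rest ih =>
    simp only [List.foldl_cons, ih, List.mem_cons]
    rw [PySem.Dict.getD_insert]
    by_cases hr : x ∈ rest
    · simp [hr]
    · by_cases hxj : x = j <;> simp [hr, hxj]

def DiagOK (Xc Yc : List Char) (m n d : Int) (p : PySem.Dict Int Int) : Prop :=
  ∀ j : Int, max 0 (d - m) ≤ j → j ≤ min d n → p.getD j 0 = (lcsI Xc Yc (d - j).toNat j.toNat : Int)

lemma lcsDiagCell_correct {Xc Yc : List Char} {m n : Int}
    (hm : m = Xc.length) (hn : n = Yc.length)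
    {p2 p1 : PySem.Dict Int Int} {d j : Int}
    (h2 : 2 ≤ d → DiagOK Xc Yc m n (d - 2) p2) (h1 : DiagOK Xc Yc m n (d - 1) p1)
    (hlo : max 0 (d - m) ≤ j) (hhi : j ≤ min d n) :
    lcsDiagCell Xc Yc p2 p1 d j = (lcsI Xc Yc (d - j).toNat j.toNat : Int) := by
  have hm0 : 0 ≤ m := by rw [hm]; exact Int.natCast_nonneg _
  have hn0 : 0 ≤ n := by rw [hn]; exact Int.natCast_nonneg _
  unfold lcsDiagCell
  by_cases h0 : d - j = 0 ∨ j = 0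
  · rw [if_pos h0]
    rcases h0 with h | h <;> simp [h]
  · rw [if_neg h0]
    push_neg at h0
    obtain ⟨hdj, hj0⟩ := h0
    have hj1 : 1 ≤ j := by omega
    have hi1 : 1 ≤ d - j := by omega
    have him : d - j ≤ m := by omega
    have hjn : j ≤ n := by omega
    have hd2 : 2 ≤ d := by omega
    have e1 : (d - j).toNat = (d - j - 1).toNat + 1 := by omega
    have e2 : j.toNat = (j - 1).toNat + 1 := by omega
    rw [e1, e2, lcsI_succ]
    have hp2 : p2.getD (j-1) 0 = (lcsI Xc Yc (d - 2 - (j-1)).toNat (j-1).toNat : Int) :=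
      h2 hd2 (j-1) (by omega) (by omega)
    have hp1a : p1.getD j 0 = (lcsI Xc Yc (d - 1 - j).toNat j.toNat : Int) :=
      h1 j (by omega) (by omega)
    have hp1b : p1.getD (j-1) 0 = (lcsI Xc Yc (d - 1 - (j-1)).toNat (j-1).toNat : Int) :=
      h1 (j-1) (by omega) (by omega)
    split_ifs with h
    · rw [hp2, show (d - 2 - (j-1)).toNat = (d - j - 1).toNat by omega]
      push_cast; ring
    · rw [hp1a, hp1b,
        show (d - 1 - j).toNat = (d - j - 1).toNat by omega,
        show (d - 1 - (j-1)).toNat = (d - j).toNat by omega,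
        show j.toNat = (j-1).toNat + 1 from e2, e1]
      push_cast
      try ring

lemma diag_outer (Xc Yc : List Char) {m n : Int} (hm : m = Xc.length) (hn : n = Yc.length) :
    ∀ t : Nat, (t : Int) ≤ m + n →
      ((1:Nat) ≤ t → DiagOK Xc Yc m n ((t:Int) - 1)
        (((PySem.List.pyRange 1 ((t:Int)+1)).foldl
          (fun (st : PySem.Dict Int Int × PySem.Dict Int Int) d =>
            let cur := (PySem.List.pyRange (max 0 (d - m)) (min d n + 1)).foldl
              (fun cur j => cur.insert j (lcsDiagCell Xc Yc st.1 st.2 d j)) PySem.Dict.empty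
            (st.2, cur))
          (PySem.Dict.empty, PySem.Dict.empty.insert 0 0)).1)) ∧
      DiagOK Xc Yc m n (t:Int)
        (((PySem.List.pyRange 1 ((t:Int)+1)).foldl
          (fun (st : PySem.Dict Int Int × PySem.Dict Int Int) d =>
            let cur := (PySem.List.pyRange (max 0 (d - m)) (min d n + 1)).foldl
              (fun cur j => cur.insert j (lcsDiagCell Xc Yc st.1 st.2 d j)) PySem.Dict.empty
            (st.2, cur))
          (PySem.Dict.empty, PySem.Dict.empty.insert 0 0)).2) := by
  have hm0 : 0 ≤ m := by rw [hm]; exact Int.natCast_nonneg _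
  have hn0 : 0 ≤ n := by rw [hn]; exact Int.natCast_nonneg _
  intro t
  induction t with
  | zero =>
    intro _
    rw [show ((0:Nat):Int) + 1 = 1 by norm_num, PySem.List.pyRange_one_eq_nil le_rfl]
    constructor
    · intro h; omega
    · intro j hlo hhi
      simp only [List.foldl_nil]
      have hj : j = 0 := by omega
      subst hj
      rw [PySem.Dict.getD_insert]
      simp
  | succ t ih =>
    intro ht1
    obtain ⟨ih1, ih2⟩ := ih (by push_cast; omega)
    rw [show ((t+1:Nat):Int) + 1 = ((t:Int) + 1) + 1 by push_cast; ring,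
      PySem.List.pyRange_one_succ_right (by omega), List.foldl_append]
    simp only [List.foldl_cons, List.foldl_nil]
    constructor
    · intro _
      rw [show ((t+1:Nat):Int) - 1 = (t:Int) by push_cast; ring]
      exact ih2
    · intro j hlo hhi
      rw [getD_foldl_insert]
      rw [if_pos (by rw [PySem.List.mem_pyRange_one]; push_cast at hlo hhi ⊢; omega)]
      rw [lcsDiagCell_correct hm hn (fun h2 => by
            rw [show (t:Int) + 1 - 2 = (t:Int) - 1 by ring]
            exact ih1 (by omega))
          (by rw [show (t:Int) + 1 - 1 = (t:Int) by ring]; exact ih2)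
          (by push_cast at hlo ⊢; omega) (by push_cast at hhi ⊢; omega)]
      push_cast
      ring_nf

lemma lcs_len_eq_lcsI (X Y : String) :
    lcs_len X Y = (lcsI X.toList Y.toList X.toList.length Y.toList.length : Int) := by
  unfold lcs_len
  dsimp only
  obtain ⟨-, h2⟩ := diag_outer X.toList Y.toList rfl rfl (X.toList.length + Y.toList.length)
    (by push_cast; omega)
  have := h2 (Y.toList.length : Int) (by push_cast; omega) (by push_cast; omega)
  rw [show ((X.toList.length : Int) + (Y.toList.length : Int) + 1)
      = (((X.toList.length + Y.toList.length : Nat) : Int) + 1) by push_cast; ring]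
  rw [show (((X.toList.length + Y.toList.length : Nat)) : Int) - (Y.toList.length : Int)
      = (X.toList.length : Int) by push_cast; ring] at this
  simpa using this


lemma gls_eq_lcs_len (X Y : String) : generate_longest_string X Y = lcs_len X Y := by
  rw [gls_eq_lcsI, lcs_len_eq_lcsI]

lemma lcs_len_nonneg (X Y : String) : 0 ≤ lcs_len X Y := by
  rw [lcs_len_eq_lcsI]; exact Int.natCast_nonneg _

def scanA (s : Int → Int) (w : Int) (K : Int) : Int × (Int × Int) :=
  (PySem.List.pyRange 0 K).foldl
    (fun (st : Int × (Int × Int)) i => if s i > st.1 then (s i, (i, i + w)) else st)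
    ((0:Int), ((0:Int), (0:Int)))

lemma scanA_char (s : Int → Int) (w : Int) : ∀ c : Nat,
    (∀ i : Nat, i < c → s i ≤ (scanA s w c).1) ∧ 0 ≤ (scanA s w c).1 ∧
    ((scanA s w c).1 = 0 → (scanA s w c).2 = (0, 0)) ∧
    (0 < (scanA s w c).1 → ∃ k : Nat, k < c ∧ s k = (scanA s w c).1 ∧
      (∀ j : Nat, j < k → s j < (scanA s w c).1) ∧ (scanA s w c).2 = ((k:Int), (k:Int) + w)) := by
  intro c
  induction c with
  | zero =>
    rw [show scanA s w ((0:Nat):Int) = (0, (0,0)) by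
      unfold scanA; rw [PySem.List.pyRange_one_eq_nil (by norm_num)]; rfl]
    refine ⟨by omega, by norm_num, fun _ => rfl, by norm_num⟩
  | succ c ih =>
    obtain ⟨ih1, ih2, ih3, ih4⟩ := ih
    have hstep : scanA s w ((c+1:Nat):Int)
        = (if s c > (scanA s w c).1 then (s c, ((c:Int), (c:Int) + w)) else scanA s w c) := by
      unfold scanA
      rw [show ((c+1:Nat):Int) = (c:Int) + 1 by push_cast; ring,
        PySem.List.pyRange_one_succ_right (Int.natCast_nonneg c), List.foldl_append]
      simp only [List.foldl_cons, List.foldl_nil]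
    rw [hstep]
    by_cases h : s c > (scanA s w c).1
    · rw [if_pos h]
      refine ⟨?_, by simp only; omega, by simp only; omega, ?_⟩
      · intro i hi
        simp only
        rcases Nat.lt_or_ge i c with hic | hic
        · have := ih1 i hic; omega
        · have : i = c := by omega
          subst this; omega
      · intro _
        exact ⟨c, by omega, rfl, fun j hj => by have := ih1 j hj; simp only; omega, rfl⟩
    · rw [if_neg h]
      refine ⟨?_, ih2, ih3, ?_⟩
      · intro i hi
        rcases Nat.lt_or_ge i c with hic | hic
        · exact ih1 i hic
        · have : i = c := by omega
          subst this; omega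
      · intro hpos
        obtain ⟨k, hk, hsk, hmin, hout⟩ := ih4 hpos
        exact ⟨k, by omega, hsk, hmin, hout⟩

lemma scan_eq (s : Int → Int) (hs : ∀ i, 0 ≤ s i) (w K : Int) :
    ((PySem.List.pyRange 0 K).foldl
      (fun (st : Int × (Int × Int)) i => if s i > st.1 then (s i, (i, i + w)) else st)
      ((0:Int), ((0:Int), (0:Int)))).2
    = (let scores := (PySem.List.pyRange 0 K).map s
       let best := (PySem.List.max? scores (fun x => x)).getD 0
       if best ≤ 0 then ((0:Int), (0:Int))
       else
         let k : Nat := (PySem.List.index? scores best).getD 0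
         ((k : Int), (k : Int) + w)) := by
  by_cases hK : K ≤ 0
  · rw [PySem.List.pyRange_one_eq_nil hK]
    simp [PySem.List.max?]
  · have hK' : 0 < K := by omega
    have hKc : K = ((K.toNat : Nat) : Int) := by omega
    set c : Nat := K.toNat with hc
    obtain ⟨h1, h2, h3, h4⟩ := scanA_char s w c
    have hfold : ((PySem.List.pyRange 0 K).foldl
        (fun (st : Int × (Int × Int)) i => if s i > st.1 then (s i, (i, i + w)) else st)
        ((0:Int), ((0:Int), (0:Int)))) = scanA s w c := by
      rw [hKc]; rfl
    rw [hfold]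
    set scores := (PySem.List.pyRange 0 K).map s with hscores
    have hlen : scores.length = c := by
      rw [hscores, List.length_map, PySem.List.length_pyRange_one]; omega
    have hne : scores ≠ [] := by
      intro h; rw [h] at hlen; simp at hlen; omega
    have hget : ∀ (j : Nat) (hj : j < scores.length), scores[j] = s j := by
      intro j hj
      simp only [hscores, List.getElem_map, PySem.List.getElem_pyRange_one]
      norm_num
    obtain ⟨b, hb⟩ : ∃ b, PySem.List.max? scores (fun x => x) = some b := by
      cases hmax : PySem.List.max? scores (fun x => x) with
      | none => exact absurd ((PySem.List.max?_eq_none_iff _ _).mp hmax) hne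
      | some b => exact ⟨b, rfl⟩
    have hbmem := PySem.List.max?_mem hb
    have hbmax := PySem.List.max?_isMax hb
    -- b = the fold's running maximum
    have hble : b ≤ (scanA s w c).1 := by
      obtain ⟨j, hj, hjb⟩ := List.getElem_of_mem hbmem
      rw [hget j hj] at hjb
      rw [← hjb]; exact h1 j (by omega)
    have hMle : (scanA s w c).1 ≤ b := by
      rcases eq_or_lt_of_le h2 with hM0 | hMpos
      · rw [← hM0]
        obtain ⟨j, hj, hjb⟩ := List.getElem_of_mem hbmem
        rw [hget j hj] at hjb
        rw [← hjb]; exact hs _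
      · obtain ⟨k, hk, hsk, -, -⟩ := h4 hMpos
        rw [← hsk]
        have : s (k:Int) = scores[k]'(by omega) := (hget k (by omega)).symm
        rw [this]
        exact hbmax _ (List.getElem_mem _)
    have hbM : b = (scanA s w c).1 := le_antisymm hble hMle
    by_cases hb0 : b ≤ 0
    · have : (scanA s w c).1 = 0 := by omega
      simp only [hb, Option.getD_some]
      rw [if_pos hb0]
      exact h3 this
    · simp only [hb, Option.getD_some]
      rw [if_neg hb0]
      have hMpos : 0 < (scanA s w c).1 := by omega
      obtain ⟨k, hk, hsk, hmin, hout⟩ := h4 hMpos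
      obtain ⟨k', hk'⟩ : ∃ k', PySem.List.index? scores b = some k' := by
        cases hidx : PySem.List.index? scores b with
        | none => exact absurd ((PySem.List.index?_eq_none_iff _ _).mp hidx) (by simp [hbmem])
        | some k' => exact ⟨k', rfl⟩
      obtain ⟨hk'len, hk'val, hk'min⟩ := PySem.List.getElem_of_index?_eq_some hk'
      have hkk' : k' = k := by
        rcases Nat.lt_trichotomy k' k with h | h | h
        · exfalso
          have := hmin k' h
          rw [hget k' hk'len] at hk'val
          omega
        · exact h
        · exfalso
          have := hk'min k h
          rw [hget k (by omega)] at this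
          rw [hbM] at this
          exact this hsk
      rw [hk', Option.getD_some, hkk', hout]

-- ===== VERDICT (by name: the statement is the Claim_ definition above) =====
theorem generate_overlap_idx_spec : Claim_equal_generate_overlap_idx := by
  intro q mid _
  unfold Spec_generate_overlap_idx generate_overlap_idx generate_overlap_idx_alt
  dsimp only
  simp only [gls_eq_lcs_len]
  exact scan_eq
    (fun i => lcs_len (PySem.Str.join " " (PySem.Str.split₀ mid))
      (PySem.Str.join " " (PySem.List.slice (PySem.Str.split₀ q) (some i)
        (some (i + ((PySem.Str.split₀ mid).length : Int))))))
    (fun i => lcs_len_nonneg _ _)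
    ((PySem.Str.split₀ mid).length : Int)
    (((PySem.Str.split₀ q).length : Int) - ((PySem.Str.split₀ mid).length : Int) + 1)
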